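-- pv_equiv track=rewrite | github.com/het1613/CCC-Solutions-2006-to-2021 | 2020/Cyclic Shifts J4 CCC 2020.py | Cyclic_Shifts
-- ===== SOURCE A (Python) =====
-- def Cyclic_Shifts(text,old_string): #This defines a new function called "Cyclic_Shifts" which has 2 parameters
--                                     #The first parameter is a string representing the main text we have to we have to find a cyclic shift within which in this case the function has assigned to the varaible "text"
--                                     #The second parameter is also a string representing the string we will create cyclic versions of to mind in the main text which the function has assigned to the variable "old_string"
--                                     #The return of this function a string, either 'yes' or 'no' representing if the main text contains a cyclic shift of old_string
--                                     #All the indented statements below are a part of the function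
--
--     for cycle_count in range(len(old_string)): #creates a for loop which will repeat the statements below for the length of the varaible old_string times. The integer variable "cyclic_count" represents the current shift we are on which starts at 0 and ends 1 below the length of old_string, incrementing by 1 each time for loop is completed.
--
--         new_string=old_string[1:]+old_string[0] #this statement will move the first character of 'old_string' to the back using splicing
--                                                 #this cyclic shift of old_string is assigned to the varaible 'new_string'
--                                                 #splicing has 3 arguments, the first being an integer representing the starting index of the substring, in this case the varaible start
--                                                 #the second being an integer representing the ending index of the substring, in this case the varaible end
--                                                 #the last is an optional argumenht which is step, which skips n number of characters in the main string to create a substring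
--                                                 #for 'old_string[1:]' we are creating a substring from the character at index 1 of old_string to the end and adding character at index 0 of old_string to the back
--
--         if new_string in text: #checks if 'new_string' is in 'text'
--             status='yes' #if it is, text contains a cyclic shift of the string 'old_string'. So, 'yes' is assigned to the varaiable 'status'
--             break #since we have found a valid cyclic shift, we can break out of the for loop
--
--         old_string=new_string #new_string is now assigned to old_string and we can repeat the process of moving the first character to the back again
--
--     else: #the statement below is executed if the for loop is completed without breaking
--         status='no' #this means 'text' does not contain a cyclic shift of 'old_string'. So, 'no' is assigned to the variable 'status'
--
--     return status #this returns the varaible status back to wherever the function was called from in the main program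
-- ===== SOURCE B (Python) =====
-- def Cyclic_Shifts(text, old_string):
--     m = len(old_string)
--     doubled = old_string + old_string
--     rotations = {doubled[i:i + m] for i in range(m)}
--     for i in range(len(text) - m + 1):
--         if text[i:i + m] in rotations:
--             return 'yes'
--     return 'no'
-- ===== Notes on version B (the rewrite author's own statement) =====
-- stated objective: alternative
-- what changed: Instead of repeatedly rotating old_string and substring-searching the whole text for each rotation, B builds the set of all rotations once (as length-m windows of old_string+old_string) and makes a single pass over the length-m windows of text, testing each against that set.
import Mathlib
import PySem

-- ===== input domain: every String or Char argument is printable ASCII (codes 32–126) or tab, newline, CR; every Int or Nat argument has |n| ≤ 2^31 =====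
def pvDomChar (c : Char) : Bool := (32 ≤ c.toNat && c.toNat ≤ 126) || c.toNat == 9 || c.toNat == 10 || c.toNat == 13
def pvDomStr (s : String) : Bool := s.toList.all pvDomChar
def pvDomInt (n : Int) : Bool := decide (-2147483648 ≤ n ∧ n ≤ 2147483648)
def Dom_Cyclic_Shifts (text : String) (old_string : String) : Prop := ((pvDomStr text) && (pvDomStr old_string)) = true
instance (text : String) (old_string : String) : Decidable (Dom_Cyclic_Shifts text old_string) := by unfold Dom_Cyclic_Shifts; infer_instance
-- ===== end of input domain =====

-- B replaces A's rotate-and-search loop by one pass over text windows tested against a precomputed set of rotations (alternative algorithm).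


-- ===== PORT A =====
-- the 'for cycle_count in range(len(old_string))' loop, with the running old_string as state;
-- 'old_string[1:] + old_string[0]' is 'old.tail ++ old.take 1' (old is nonempty at every reached call,
-- since the loop runs len(old_string) times and rotation preserves the length, so take 1 = [old[0]]);
-- returning "yes" is the break, running out of fuel is the for-else branch.
def pvALoop (text : List Char) : Nat → List Char → String
  | 0, _ => "no"
  | n + 1, old =>
    let new_string := old.tail ++ old.take 1
    if PySem.Chars.isIn new_string text then "yes"
    else pvALoop text n new_string

def Cyclic_Shifts (text : String) (old_string : String) : String :=
  pvALoop text.toList old_string.toList.length old_string.toList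

-- ===== PORT B =====
-- rotations = {doubled[i:i+m] for i in range(m)}
def pvRotations (old : List Char) : PySem.Set (List Char) :=
  PySem.Set.ofList ((List.range old.length).map
    (fun (i : Nat) => PySem.List.slice (old ++ old) (some (i : Int)) (some ((i : Int) + (old.length : Int)))))

-- 'for i in range(len(text)-m+1): if text[i:i+m] in rotations: return "yes"' / final 'return "no"'
def pvBGo (tl : List Char) (m : Nat) (rots : PySem.Set (List Char)) : List Nat → String
  | [] => "no"
  | i :: rest =>
    if PySem.Set.contains rots (PySem.List.slice tl (some (i : Int)) (some ((i : Int) + (m : Int)))) then "yes"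
    else pvBGo tl m rots rest

def Cyclic_Shifts_alt (text : String) (old_string : String) : String :=
  let m := old_string.toList.length
  -- range(len(text) - m + 1) on Python ints = List.range (len + 1 - m) in Nat (empty when m > len)
  pvBGo text.toList m (pvRotations old_string.toList) (List.range (text.toList.length + 1 - m))

-- ===== PRECONDITION & SPEC =====
def Spec_Cyclic_Shifts (text : String) (old_string : String) (out : String) : Prop := out = Cyclic_Shifts_alt text old_string
instance (text : String) (old_string : String) (out : String) : Decidable (Spec_Cyclic_Shifts text old_string out) := by unfold Spec_Cyclic_Shifts; infer_instance

-- ===== CLAIM (what is proved, stated in full; the proofs are below) =====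
def Claim_equal_Cyclic_Shifts : Prop := ∀ (text : String) (old_string : String), Dom_Cyclic_Shifts text old_string → Spec_Cyclic_Shifts text old_string (Cyclic_Shifts text old_string)

-- ===== LEMMAS AND PROOFS =====

-- one rotation step on a k-rotated list advances k
theorem pv_rot_step (s : List Char) (k : Nat) (hk : k < s.length) :
    (s.drop k ++ s.take k).tail ++ (s.drop k ++ s.take k).take 1
      = s.drop (k + 1) ++ s.take (k + 1) := by
  have hd : s.drop k = s[k] :: s.drop (k + 1) := List.drop_eq_getElem_cons hk
  rw [hd]
  simp only [List.cons_append, List.tail_cons, List.take_zero,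
    List.take_add_one, List.getElem?_eq_getElem hk, Option.toList_some, List.append_assoc]
  simp

-- the full rotation equals the trivial one
theorem pv_rot_mod (s : List Char) :
    s.drop s.length ++ s.take s.length = s.drop 0 ++ s.take 0 := by
  simp

-- a length-m window of the doubled list is a rotation
theorem pv_window_eq_rot (s : List Char) (j : Nat) (hj : j ≤ s.length) :
    (((s ++ s).drop j).take s.length) = s.drop j ++ s.take j := by
  rw [List.drop_append_of_le_length hj, List.take_append]
  rw [List.take_of_length_le (by simp)]
  congr 2
  simp
  omega

-- A's loop returns "yes" iff some later rotation occurs in text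
theorem pv_aLoop_yes (t s : List Char) (n k : Nat) (h : k + n ≤ s.length) :
    pvALoop t n (s.drop k ++ s.take k) = "yes"
      ↔ ∃ j, k < j ∧ j ≤ k + n ∧ PySem.Chars.isIn (s.drop j ++ s.take j) t = true := by
  induction n generalizing k with
  | zero =>
    simp only [pvALoop]
    constructor
    · intro hc; exact absurd hc (by decide)
    · rintro ⟨j, hj1, hj2, _⟩; omega
  | succ n ih =>
    have hk : k < s.length := by omega
    simp only [pvALoop, pv_rot_step s k hk]
    by_cases hin : PySem.Chars.isIn (s.drop (k+1) ++ s.take (k+1)) t = true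
    · simp only [hin, if_true]
      constructor
      · intro _; exact ⟨k + 1, by omega, by omega, hin⟩
      · intro _; trivial
    · simp only [Bool.not_eq_true] at hin
      simp only [hin, Bool.false_eq_true, if_false]
      rw [ih (k + 1) (by omega)]
      constructor
      · rintro ⟨j, h1, h2, h3⟩; exact ⟨j, by omega, by omega, h3⟩
      · rintro ⟨j, h1, h2, h3⟩
        refine ⟨j, ?_, by omega, h3⟩
        rcases Nat.eq_or_lt_of_le (Nat.succ_le_of_lt h1) with he | hl
        · exfalso; have : k + 1 = j := by omega
          rw [this, h3] at hin; cases hin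
        · omega

theorem pv_aLoop_cases (t : List Char) (n : Nat) (old : List Char) :
    pvALoop t n old = "yes" ∨ pvALoop t n old = "no" := by
  induction n generalizing old with
  | zero => right; rfl
  | succ n ih =>
    simp only [pvALoop]
    split
    · left; rfl
    · exact ih _

-- B's loop returns "yes" iff some window is in the rotation set
theorem pv_bGo_yes (tl : List Char) (m : Nat) (rots : PySem.Set (List Char)) (is : List Nat) :
    pvBGo tl m rots is = "yes"
      ↔ ∃ i ∈ is, PySem.Set.contains rots (PySem.List.slice tl (some (i : Int)) (some ((i : Int) + (m : Int)))) = true := by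
  induction is with
  | nil => simp [pvBGo]
  | cons i rest ih =>
    simp only [pvBGo]
    split
    · simp_all
    · simp_all

theorem pv_bGo_cases (tl : List Char) (m : Nat) (rots : PySem.Set (List Char)) (is : List Nat) :
    pvBGo tl m rots is = "yes" ∨ pvBGo tl m rots is = "no" := by
  induction is with
  | nil => right; rfl
  | cons i rest ih =>
    simp only [pvBGo]
    split
    · left; rfl
    · exact ih

-- the core equivalence: some rotation is an infix of text ↔ some window of text is a rotation
theorem pv_cond_iff (t s : List Char) :
    (∃ j, 0 < j ∧ j ≤ s.length ∧ PySem.Chars.isIn (s.drop j ++ s.take j) t = true)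
      ↔ ∃ i ∈ List.range (t.length + 1 - s.length), ∃ j < s.length,
          (t.drop i).take s.length = s.drop j ++ s.take j := by
  constructor
  · rintro ⟨j, hj0, hjm, hin⟩
    obtain ⟨pre, suf, hps⟩ := (PySem.Chars.isIn_iff_infix _ _).mp hin
    have hlenr : (s.drop j ++ s.take j).length = s.length := by
      simp; omega
    have hdrop : t.drop pre.length = (s.drop j ++ s.take j) ++ suf := by
      rw [← hps]; simp [List.append_assoc]
    have htake : (t.drop pre.length).take s.length = s.drop j ++ s.take j := by
      rw [hdrop, List.take_left' hlenr]
    have hlt : pre.length < t.length + 1 - s.length := by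
      have : t.length = pre.length + s.length + suf.length := by
        rw [← hps]; simp; omega
      omega
    refine ⟨pre.length, List.mem_range.mpr hlt, ?_⟩
    by_cases hje : j = s.length
    · exact ⟨0, by omega, by rw [htake, hje, pv_rot_mod s]⟩
    · exact ⟨j, by omega, htake⟩
  · rintro ⟨i, hi, j, hjm, hw⟩
    have hinf : (s.drop j ++ s.take j) <:+: t := by
      rw [← hw]
      exact ((t.drop i).take_prefix s.length).isInfix.trans (t.drop_suffix i).isInfix
    by_cases hj0 : j = 0
    · refine ⟨s.length, by omega, le_refl _, (PySem.Chars.isIn_iff_infix _ _).mpr ?_⟩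
      rw [pv_rot_mod s]
      rw [hj0] at hinf; exact hinf
    · exact ⟨j, by omega, by omega, (PySem.Chars.isIn_iff_infix _ _).mpr hinf⟩

-- the rotation set is the set of rotations
theorem pv_rotations_eq (s : List Char) :
    pvRotations s = PySem.Set.ofList ((List.range s.length).map (fun j => s.drop j ++ s.take j)) := by
  have hmap : (List.range s.length).map
        (fun (i : Nat) => PySem.List.slice (s ++ s) (some (i : Int)) (some ((i : Int) + (s.length : Int))))
      = (List.range s.length).map (fun j => s.drop j ++ s.take j) :=
    List.map_congr_left (fun j hj => by
      rw [PySem.List.slice_natCast_add]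
      exact pv_window_eq_rot s j (le_of_lt (List.mem_range.mp hj)))
  unfold pvRotations
  rw [hmap]

theorem pv_contains_iff (s : List Char) (w : List Char) :
    PySem.Set.contains (pvRotations s) w = true ↔ ∃ j < s.length, w = s.drop j ++ s.take j := by
  rw [pv_rotations_eq]
  simp only [PySem.Set.contains]
  rw [List.contains_iff_mem]
  rw [PySem.Set.mem_ofList]
  simp only [List.mem_map, List.mem_range]
  constructor
  · rintro ⟨j, hj, he⟩; exact ⟨j, hj, he.symm⟩
  · rintro ⟨j, hj, he⟩; exact ⟨j, hj, he.symm⟩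

theorem Cyclic_Shifts_eq (text old_string : String) :
    Cyclic_Shifts text old_string = Cyclic_Shifts_alt text old_string := by
  have hA0 : Cyclic_Shifts text old_string
      = pvALoop text.toList old_string.toList.length
          (old_string.toList.drop 0 ++ old_string.toList.take 0) := by
    simp [Cyclic_Shifts]
  have hAyes : Cyclic_Shifts text old_string = "yes"
      ↔ ∃ j, 0 < j ∧ j ≤ old_string.toList.length
          ∧ PySem.Chars.isIn (old_string.toList.drop j ++ old_string.toList.take j) text.toList = true := by
    rw [hA0, pv_aLoop_yes text.toList old_string.toList old_string.toList.length 0 (by omega)]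
    simp only [Nat.zero_add]
  have hByes : Cyclic_Shifts_alt text old_string = "yes"
      ↔ ∃ i ∈ List.range (text.toList.length + 1 - old_string.toList.length),
          ∃ j < old_string.toList.length,
            (text.toList.drop i).take old_string.toList.length
              = old_string.toList.drop j ++ old_string.toList.take j := by
    show pvBGo _ _ _ _ = "yes" ↔ _
    rw [pv_bGo_yes]
    apply exists_congr; intro i
    apply and_congr_right; intro _
    rw [PySem.List.slice_natCast_add text.toList i old_string.toList.length]
    exact pv_contains_iff old_string.toList _
  rcases pv_aLoop_cases text.toList old_string.toList.length old_string.toList with hA | hA <;>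
    rcases pv_bGo_cases text.toList old_string.toList.length (pvRotations old_string.toList)
      (List.range (text.toList.length + 1 - old_string.toList.length)) with hB | hB
  all_goals
    have hA' : Cyclic_Shifts text old_string = pvALoop text.toList old_string.toList.length old_string.toList := rfl
    have hB' : Cyclic_Shifts_alt text old_string
        = pvBGo text.toList old_string.toList.length (pvRotations old_string.toList)
            (List.range (text.toList.length + 1 - old_string.toList.length)) := rfl
  · rw [hA', hA, hB', hB]
  · exfalso
    have : Cyclic_Shifts_alt text old_string = "yes" :=
      hByes.mpr ((pv_cond_iff text.toList old_string.toList).mp (hAyes.mp (by rw [hA', hA])))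
    rw [hB', hB] at this; exact absurd this (by decide)
  · exfalso
    have : Cyclic_Shifts text old_string = "yes" :=
      hAyes.mpr ((pv_cond_iff text.toList old_string.toList).mpr (hByes.mp (by rw [hB', hB])))
    rw [hA', hA] at this; exact absurd this (by decide)
  · rw [hA', hA, hB', hB]

-- ===== VERDICT (by name: the statement is the Claim_ definition above) =====
theorem Cyclic_Shifts_spec : Claim_equal_Cyclic_Shifts := by
  intro text old_string _
  exact Cyclic_Shifts_eq text old_string
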